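-- pv_equiv track=rewrite | github.com/kurthamm/flighttrak-enhanced | archive/ai_intelligence_deprecated/aircraft_lookup.py | parse_aircraft_type
-- ===== SOURCE A (Python) =====
-- from typing import Dict, Optional, Union
--
-- def parse_aircraft_type(type_code: str) -> Dict[str, str]:
--     """Parse ICAO aircraft type code into category information"""
--     if not type_code:
--         return {'category': 'Unknown', 'description': 'Unknown aircraft type'}
--
--     # Common aircraft type patterns
--     type_info = {
--         'category': 'Aircraft',
--         'description': type_code
--     }
--
--     # Identify aircraft categories by common patterns
--     if any(x in type_code.upper() for x in ['B737', 'B738', 'B739']):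
--         type_info.update({'category': 'Commercial Airliner', 'description': 'Boeing 737 Series'})
--     elif any(x in type_code.upper() for x in ['B777', 'B778', 'B779']):
--         type_info.update({'category': 'Commercial Airliner', 'description': 'Boeing 777 Series'})
--     elif any(x in type_code.upper() for x in ['A320', 'A319', 'A321']):
--         type_info.update({'category': 'Commercial Airliner', 'description': 'Airbus A320 Family'})
--     elif any(x in type_code.upper() for x in ['A330', 'A340', 'A350']):
--         type_info.update({'category': 'Commercial Airliner', 'description': 'Airbus Wide-body'})
--     elif 'C172' in type_code.upper():
--         type_info.update({'category': 'General Aviation', 'description': 'Cessna 172'})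
--     elif any(x in type_code.upper() for x in ['GLEX', 'GLF', 'G650']):
--         type_info.update({'category': 'Business Jet', 'description': 'Gulfstream'})
--     elif any(x in type_code.upper() for x in ['H60', 'H-60', 'UH60']):
--         type_info.update({'category': 'Military Helicopter', 'description': 'Black Hawk'})
--     elif 'C130' in type_code.upper():
--         type_info.update({'category': 'Military Transport', 'description': 'C-130 Hercules'})
--
--     return type_info
-- ===== SOURCE B (Python) =====
-- # Different algorithm: instead of testing each pattern group against the string
-- # (elif chain of substring searches), scan the uppercased string once, looking up
-- # every 3- and 4-character window in a pattern->priority hash map and keeping the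
-- # minimum priority seen; the priority indexes the result table (objective: alternative).
-- _PRIORITY = {
--     'B737': 0, 'B738': 0, 'B739': 0,
--     'B777': 1, 'B778': 1, 'B779': 1,
--     'A320': 2, 'A319': 2, 'A321': 2,
--     'A330': 3, 'A340': 3, 'A350': 3,
--     'C172': 4,
--     'GLEX': 5, 'GLF': 5, 'G650': 5,
--     'H60': 6, 'H-60': 6, 'UH60': 6,
--     'C130': 7,
-- }
-- _RESULT = [
--     ('Commercial Airliner', 'Boeing 737 Series'),
--     ('Commercial Airliner', 'Boeing 777 Series'),
--     ('Commercial Airliner', 'Airbus A320 Family'),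
--     ('Commercial Airliner', 'Airbus Wide-body'),
--     ('General Aviation', 'Cessna 172'),
--     ('Business Jet', 'Gulfstream'),
--     ('Military Helicopter', 'Black Hawk'),
--     ('Military Transport', 'C-130 Hercules'),
-- ]
--
-- def parse_aircraft_type(type_code: str):
--     if not type_code:
--         return {'category': 'Unknown', 'description': 'Unknown aircraft type'}
--     upper = type_code.upper()
--     best = 8  # one past the lowest priority: no match yet
--     for i in range(len(upper)):
--         for w in (3, 4):
--             best = min(best, _PRIORITY.get(upper[i:i+w], 8))
--     if best == 8:
--         return {'category': 'Aircraft', 'description': type_code}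
--     category, description = _RESULT[best]
--     return {'category': category, 'description': description}
-- ===== Notes on version B (the rewrite author's own statement) =====
-- stated objective: alternative
-- what changed: Replaces the elif chain of per-pattern substring searches with a single sliding-window scan of the uppercased code: every 3- and 4-character window is looked up in a pattern-to-priority hash map and the minimum priority seen indexes a result table.
import Mathlib
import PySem

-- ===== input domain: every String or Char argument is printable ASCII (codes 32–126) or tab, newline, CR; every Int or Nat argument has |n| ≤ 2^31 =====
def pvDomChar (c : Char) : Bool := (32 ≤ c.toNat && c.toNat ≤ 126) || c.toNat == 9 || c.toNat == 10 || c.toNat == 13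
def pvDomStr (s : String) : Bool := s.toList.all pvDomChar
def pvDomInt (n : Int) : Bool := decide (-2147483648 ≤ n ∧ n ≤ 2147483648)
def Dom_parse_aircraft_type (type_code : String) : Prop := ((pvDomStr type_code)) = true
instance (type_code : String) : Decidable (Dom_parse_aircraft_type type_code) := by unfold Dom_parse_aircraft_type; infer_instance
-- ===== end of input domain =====

-- B scans the uppercased code's 3/4-char windows against a pattern->priority map
-- and keeps the minimum priority, instead of A's elif chain of substring searches
-- (objective: alternative); same return value everywhere.


-- ===== PORT A =====  (literal transliteration: dict built, then conditionally dict.update'd by an elif chain)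
def parse_aircraft_type (type_code : String) : List (String × String) :=
  if PySem.Str.len type_code = 0 then
    (PySem.Dict.ofList [("category", "Unknown"), ("description", "Unknown aircraft type")]).items
  else
    let type_info : PySem.Dict String String :=
      PySem.Dict.ofList [("category", "Aircraft"), ("description", type_code)]
    let type_info :=
      if ["B737", "B738", "B739"].any (fun x => PySem.Str.isIn x (PySem.Str.upper type_code)) then
        type_info.update [("category", "Commercial Airliner"), ("description", "Boeing 737 Series")]
      else if ["B777", "B778", "B779"].any (fun x => PySem.Str.isIn x (PySem.Str.upper type_code)) then
        type_info.update [("category", "Commercial Airliner"), ("description", "Boeing 777 Series")]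
      else if ["A320", "A319", "A321"].any (fun x => PySem.Str.isIn x (PySem.Str.upper type_code)) then
        type_info.update [("category", "Commercial Airliner"), ("description", "Airbus A320 Family")]
      else if ["A330", "A340", "A350"].any (fun x => PySem.Str.isIn x (PySem.Str.upper type_code)) then
        type_info.update [("category", "Commercial Airliner"), ("description", "Airbus Wide-body")]
      else if PySem.Str.isIn "C172" (PySem.Str.upper type_code) then
        type_info.update [("category", "General Aviation"), ("description", "Cessna 172")]
      else if ["GLEX", "GLF", "G650"].any (fun x => PySem.Str.isIn x (PySem.Str.upper type_code)) then
        type_info.update [("category", "Business Jet"), ("description", "Gulfstream")]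
      else if ["H60", "H-60", "UH60"].any (fun x => PySem.Str.isIn x (PySem.Str.upper type_code)) then
        type_info.update [("category", "Military Helicopter"), ("description", "Black Hawk")]
      else if PySem.Str.isIn "C130" (PySem.Str.upper type_code) then
        type_info.update [("category", "Military Transport"), ("description", "C-130 Hercules")]
      else
        type_info
    type_info.items

-- ===== PORT B =====  (sliding-window scan: every 3/4-char window looked up in a
-- pattern->priority map; the minimum priority seen indexes the result table)
def pvPriority : PySem.Dict String Int := PySem.Dict.ofList
  [ ("B737", 0), ("B738", 0), ("B739", 0),
    ("B777", 1), ("B778", 1), ("B779", 1),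
    ("A320", 2), ("A319", 2), ("A321", 2),
    ("A330", 3), ("A340", 3), ("A350", 3),
    ("C172", 4),
    ("GLEX", 5), ("GLF", 5), ("G650", 5),
    ("H60", 6), ("H-60", 6), ("UH60", 6),
    ("C130", 7) ]

def pvResult : List (String × String) :=
  [ ("Commercial Airliner", "Boeing 737 Series"),
    ("Commercial Airliner", "Boeing 777 Series"),
    ("Commercial Airliner", "Airbus A320 Family"),
    ("Commercial Airliner", "Airbus Wide-body"),
    ("General Aviation", "Cessna 172"),
    ("Business Jet", "Gulfstream"),
    ("Military Helicopter", "Black Hawk"),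
    ("Military Transport", "C-130 Hercules") ]

def parse_aircraft_type_alt (type_code : String) : List (String × String) :=
  if PySem.Str.len type_code = 0 then
    [("category", "Unknown"), ("description", "Unknown aircraft type")]
  else
    let upper := PySem.Str.upper type_code
    let best : Int :=
      (PySem.List.pyRange 0 (PySem.Str.len upper) 1).foldl
        (fun best i =>
          [(3 : Int), 4].foldl
            (fun best w =>
              min best (pvPriority.getD (PySem.Str.slice upper (some i) (some (i + w))) 8))
            best)
        8
    if best = 8 then
      [("category", "Aircraft"), ("description", type_code)]
    else
      match PySem.List.pyGet? pvResult best with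
      | some (category, description) => [("category", category), ("description", description)]
      | none => []  -- unreachable: 0 ≤ best < 8 here (Python would raise IndexError)

-- ===== PRECONDITION & SPEC =====
def Spec_parse_aircraft_type (type_code : String) (out : List (String × String)) : Prop := out = parse_aircraft_type_alt type_code
instance (type_code : String) (out : List (String × String)) : Decidable (Spec_parse_aircraft_type type_code out) := by unfold Spec_parse_aircraft_type; infer_instance

-- ===== CLAIM (what is proved, stated in full; the proofs are below) =====
def Claim_equal_parse_aircraft_type : Prop := ∀ (type_code : String), Dom_parse_aircraft_type type_code → Spec_parse_aircraft_type type_code (parse_aircraft_type type_code)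

-- ===== LEMMAS AND PROOFS =====

-- The first matching group of A's elif chain, expressed as a priority (8 = no group matches).
def pvTarget (u : String) : Int :=
  if ["B737", "B738", "B739"].any (fun x => PySem.Str.isIn x u) then 0
  else if ["B777", "B778", "B779"].any (fun x => PySem.Str.isIn x u) then 1
  else if ["A320", "A319", "A321"].any (fun x => PySem.Str.isIn x u) then 2
  else if ["A330", "A340", "A350"].any (fun x => PySem.Str.isIn x u) then 3
  else if PySem.Str.isIn "C172" u then 4
  else if ["GLEX", "GLF", "G650"].any (fun x => PySem.Str.isIn x u) then 5
  else if ["H60", "H-60", "UH60"].any (fun x => PySem.Str.isIn x u) then 6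
  else if PySem.Str.isIn "C130" u then 7
  else 8

-- The window string u[j : j+L] and the candidate priority B computes at position j.
def pvWin (u : String) (j : Nat) (L : Int) : String :=
  PySem.Str.slice u (some (j : Int)) (some ((j : Int) + L))

def pvV (u : String) (j : Nat) : Int :=
  min (pvPriority.getD (pvWin u j 3) 8) (pvPriority.getD (pvWin u j 4) 8)

lemma pvWin_toList (u : String) (j : Nat) (L : Int) (hL : 0 ≤ L) :
    (pvWin u j L).toList = (u.toList.drop j).take (((j : Int) + L).toNat - j) := by
  rw [pvWin, PySem.Str.toList_slice, PySem.Chars.slice_eq_listSlice,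
    PySem.List.slice_toNat _ (by positivity) (by omega)]
  simp

-- A dict lookup with default either returns the default or a value paired with the key.
lemma pv_getD_cases (l : List (String × Int)) (key : String) (d : Int) :
    (PySem.Dict.mk l).getD key d = d ∨
      ∃ v, (key, v) ∈ l ∧ (PySem.Dict.mk l).getD key d = v := by
  induction l with
  | nil => left; rfl
  | cons kv rest ih =>
    obtain ⟨k, v⟩ := kv
    rw [PySem.Dict.getD_eq_get?_getD, PySem.Dict.get?_mk_cons]
    by_cases h : (k == key) = true
    · right
      refine ⟨v, ?_, ?_⟩
      · have hk : k = key := by simpa using h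
        simp [hk]
      · rw [if_pos h]; rfl
    · rw [if_neg h, ← PySem.Dict.getD_eq_get?_getD]
      rcases ih with h1 | ⟨w, hw, he⟩
      · left; exact h1
      · right; exact ⟨w, List.mem_cons_of_mem _ hw, he⟩

-- A window of u that equals a pattern makes the pattern a substring of u.
lemma pv_isIn_of_win_eq (u p : String) (j : Nat) (L : Int) (hL : 0 ≤ L)
    (h : p = pvWin u j L) : PySem.Str.isIn p u = true := by
  rw [PySem.Str.isIn_iff_infix]
  have ht : p.toList = (u.toList.drop j).take (((j : Int) + L).toNat - j) := by
    rw [h, pvWin_toList u j L hL]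
  rw [ht]
  exact (List.take_prefix _ _).isInfix.trans (List.drop_suffix _ _).isInfix

lemma pvTarget_le8 (u : String) : pvTarget u ≤ 8 := by
  unfold pvTarget; split_ifs <;> omega

-- One lemma per group: if the group's condition holds, the first match is at most its index.
lemma pvT0 (u : String)
    (h : ["B737", "B738", "B739"].any (fun x => PySem.Str.isIn x u) = true) :
    pvTarget u ≤ 0 := by
  unfold pvTarget; split_ifs <;> omega

lemma pvT1 (u : String)
    (h : ["B777", "B778", "B779"].any (fun x => PySem.Str.isIn x u) = true) :
    pvTarget u ≤ 1 := by
  unfold pvTarget; split_ifs <;> omega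

lemma pvT2 (u : String)
    (h : ["A320", "A319", "A321"].any (fun x => PySem.Str.isIn x u) = true) :
    pvTarget u ≤ 2 := by
  unfold pvTarget; split_ifs <;> omega

lemma pvT3 (u : String)
    (h : ["A330", "A340", "A350"].any (fun x => PySem.Str.isIn x u) = true) :
    pvTarget u ≤ 3 := by
  unfold pvTarget; split_ifs <;> omega

lemma pvT4 (u : String) (h : PySem.Str.isIn "C172" u = true) : pvTarget u ≤ 4 := by
  unfold pvTarget; split_ifs <;> omega

lemma pvT5 (u : String)
    (h : ["GLEX", "GLF", "G650"].any (fun x => PySem.Str.isIn x u) = true) :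
    pvTarget u ≤ 5 := by
  unfold pvTarget; split_ifs <;> omega

lemma pvT6 (u : String)
    (h : ["H60", "H-60", "UH60"].any (fun x => PySem.Str.isIn x u) = true) :
    pvTarget u ≤ 6 := by
  unfold pvTarget; split_ifs <;> omega

lemma pvT7 (u : String) (h : PySem.Str.isIn "C130" u = true) : pvTarget u ≤ 7 := by
  unfold pvTarget; split_ifs <;> omega

-- Every window's priority bounds the first matching group from below.
set_option maxHeartbeats 800000 in
lemma pv_window_le (u : String) (j : Nat) (L : Int) (hL : 0 ≤ L) :
    pvTarget u ≤ pvPriority.getD (pvWin u j L) 8 := by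
  have hIn : PySem.Str.isIn (pvWin u j L) u = true := pv_isIn_of_win_eq u _ j L hL rfl
  rcases pv_getD_cases
      [ ("B737", 0), ("B738", 0), ("B739", 0),
        ("B777", 1), ("B778", 1), ("B779", 1),
        ("A320", 2), ("A319", 2), ("A321", 2),
        ("A330", 3), ("A340", 3), ("A350", 3),
        ("C172", 4),
        ("GLEX", 5), ("GLF", 5), ("G650", 5),
        ("H60", 6), ("H-60", 6), ("UH60", 6),
        ("C130", 7) ] (pvWin u j L) 8 with hd | ⟨v, hmem, he⟩
  · rw [show pvPriority.getD (pvWin u j L) 8 = 8 from hd]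
    exact pvTarget_le8 u
  · rw [show pvPriority.getD (pvWin u j L) 8 = v from he]
    simp only [List.mem_cons, List.not_mem_nil, or_false, Prod.mk.injEq] at hmem
    rcases hmem with ⟨hk, rfl⟩ | ⟨hk, rfl⟩ | ⟨hk, rfl⟩ | ⟨hk, rfl⟩ | ⟨hk, rfl⟩ |
      ⟨hk, rfl⟩ | ⟨hk, rfl⟩ | ⟨hk, rfl⟩ | ⟨hk, rfl⟩ | ⟨hk, rfl⟩ | ⟨hk, rfl⟩ |
      ⟨hk, rfl⟩ | ⟨hk, rfl⟩ | ⟨hk, rfl⟩ | ⟨hk, rfl⟩ | ⟨hk, rfl⟩ | ⟨hk, rfl⟩ |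
      ⟨hk, rfl⟩ | ⟨hk, rfl⟩ | ⟨hk, rfl⟩ <;> rw [hk] at hIn
    · exact pvT0 u (List.any_eq_true.mpr ⟨_, by simp, hIn⟩)
    · exact pvT0 u (List.any_eq_true.mpr ⟨_, by simp, hIn⟩)
    · exact pvT0 u (List.any_eq_true.mpr ⟨_, by simp, hIn⟩)
    · exact pvT1 u (List.any_eq_true.mpr ⟨_, by simp, hIn⟩)
    · exact pvT1 u (List.any_eq_true.mpr ⟨_, by simp, hIn⟩)
    · exact pvT1 u (List.any_eq_true.mpr ⟨_, by simp, hIn⟩)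
    · exact pvT2 u (List.any_eq_true.mpr ⟨_, by simp, hIn⟩)
    · exact pvT2 u (List.any_eq_true.mpr ⟨_, by simp, hIn⟩)
    · exact pvT2 u (List.any_eq_true.mpr ⟨_, by simp, hIn⟩)
    · exact pvT3 u (List.any_eq_true.mpr ⟨_, by simp, hIn⟩)
    · exact pvT3 u (List.any_eq_true.mpr ⟨_, by simp, hIn⟩)
    · exact pvT3 u (List.any_eq_true.mpr ⟨_, by simp, hIn⟩)
    · exact pvT4 u hIn
    · exact pvT5 u (List.any_eq_true.mpr ⟨_, by simp, hIn⟩)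
    · exact pvT5 u (List.any_eq_true.mpr ⟨_, by simp, hIn⟩)
    · exact pvT5 u (List.any_eq_true.mpr ⟨_, by simp, hIn⟩)
    · exact pvT6 u (List.any_eq_true.mpr ⟨_, by simp, hIn⟩)
    · exact pvT6 u (List.any_eq_true.mpr ⟨_, by simp, hIn⟩)
    · exact pvT6 u (List.any_eq_true.mpr ⟨_, by simp, hIn⟩)
    · exact pvT7 u hIn

-- A pattern occurring in u is hit by some window, giving a candidate ≤ its priority.
lemma pv_exists_window (u p : String) (k : Int)
    (hlen : p.toList.length = 3 ∨ p.toList.length = 4) (hne : p.toList ≠ [])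
    (hk : pvPriority.getD p 8 = k) (h : PySem.Str.isIn p u = true) :
    ∃ j < u.toList.length, pvV u j ≤ k := by
  rw [PySem.Str.isIn_eq] at h
  obtain ⟨j, hpre⟩ := (PySem.Chars.exists_prefix_drop_iff_isIn _ _).mpr h
  have hjlt : j < u.toList.length := by
    by_contra hj
    have hnil : u.toList.drop j = [] := List.drop_eq_nil_iff.mpr (by omega)
    rw [hnil] at hpre
    exact hne (List.prefix_nil.mp hpre)
  have hwin : ∀ L : Int, L = (p.toList.length : Int) → pvWin u j L = p := by
    intro L hLeq
    apply String.toList_inj.mp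
    rw [pvWin_toList u j L (by omega)]
    have harith : ((j : Int) + L).toNat - j = p.toList.length := by omega
    rw [harith]
    exact (List.prefix_iff_eq_take.mp hpre).symm
  refine ⟨j, hjlt, ?_⟩
  unfold pvV
  rcases hlen with h3 | h4
  · have he : pvWin u j 3 = p := hwin 3 (by rw [h3]; norm_num)
    rw [he, hk]
    exact min_le_left _ _
  · have he : pvWin u j 4 = p := hwin 4 (by rw [h4]; norm_num)
    rw [he, hk]
    exact min_le_right _ _

-- B's whole scan computes exactly the first matching group of A's chain.
set_option maxHeartbeats 800000 in
lemma pvBest_eq (u : String) :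
    (PySem.List.pyRange 0 (PySem.Str.len u) 1).foldl
      (fun best i =>
        [(3 : Int), 4].foldl
          (fun best w =>
            min best (pvPriority.getD (PySem.Str.slice u (some i) (some (i + w))) 8))
          best)
      8 = pvTarget u := by
  rw [PySem.Str.len_eq, PySem.List.pyRange_zero_natCast, List.foldl_map]
  have hstep : ∀ (acc : Int), ∀ j ∈ List.range u.toList.length,
      [(3 : Int), 4].foldl
        (fun best w =>
          min best (pvPriority.getD (PySem.Str.slice u (some ((j : Nat) : Int))
            (some (((j : Nat) : Int) + w))) 8)) acc
      = min acc (pvV u j) := by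
    intro acc j _
    simp only [List.foldl_cons, List.foldl_nil, pvV, pvWin, min_assoc]
  rw [PySem.List.foldl_congr_mem _ _ (fun acc j => min acc (pvV u j)) 8 hstep,
    ← List.foldl_map]
  obtain ⟨hle8, hleall⟩ :=
    PySem.List.foldl_min_le ((List.range u.toList.length).map (pvV u)) 8
  have key : ∀ (p : String) (k : Int),
      p.toList.length = 3 ∨ p.toList.length = 4 → p.toList ≠ [] →
      pvPriority.getD p 8 = k → PySem.Str.isIn p u = true →
      List.foldl min 8 ((List.range u.toList.length).map (pvV u)) ≤ k := by
    intro p k hl hn hp hi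
    obtain ⟨j, hj, hv⟩ := pv_exists_window u p k hl hn hp hi
    exact le_trans (hleall _ (List.mem_map_of_mem (List.mem_range.mpr hj))) hv
  apply le_antisymm
  · unfold pvTarget
    split_ifs with h1 h2 h3 h4 h5 h6 h7 h8
    · rw [List.any_eq_true] at h1
      obtain ⟨p, hp, hIn⟩ := h1
      fin_cases hp <;> exact key _ _ (by decide) (by decide) (by decide) hIn
    · rw [List.any_eq_true] at h2
      obtain ⟨p, hp, hIn⟩ := h2
      fin_cases hp <;> exact key _ _ (by decide) (by decide) (by decide) hIn
    · rw [List.any_eq_true] at h3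
      obtain ⟨p, hp, hIn⟩ := h3
      fin_cases hp <;> exact key _ _ (by decide) (by decide) (by decide) hIn
    · rw [List.any_eq_true] at h4
      obtain ⟨p, hp, hIn⟩ := h4
      fin_cases hp <;> exact key _ _ (by decide) (by decide) (by decide) hIn
    · exact key _ _ (by decide) (by decide) (by decide) h5
    · rw [List.any_eq_true] at h6
      obtain ⟨p, hp, hIn⟩ := h6
      fin_cases hp <;> exact key _ _ (by decide) (by decide) (by decide) hIn
    · rw [List.any_eq_true] at h7
      obtain ⟨p, hp, hIn⟩ := h7
      fin_cases hp <;> exact key _ _ (by decide) (by decide) (by decide) hIn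
    · exact key _ _ (by decide) (by decide) (by decide) h8
    · exact hle8
  · rcases PySem.List.foldl_min_mem ((List.range u.toList.length).map (pvV u)) 8 with
      he | hmem
    · rw [he]; exact pvTarget_le8 u
    · obtain ⟨j, _, hEq⟩ := List.mem_map.mp hmem
      rw [← hEq]
      exact le_min (pv_window_le u j 3 (by norm_num)) (pv_window_le u j 4 (by norm_num))

-- ===== VERDICT (by name: the statement is the Claim_ definition above) =====
set_option maxHeartbeats 1600000 in
theorem parse_aircraft_type_spec : Claim_equal_parse_aircraft_type := by
  intro type_code _
  unfold Spec_parse_aircraft_type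
  simp only [parse_aircraft_type, parse_aircraft_type_alt]
  by_cases h0 : PySem.Str.len type_code = 0
  · rw [if_pos h0, if_pos h0]; rfl
  · rw [if_neg h0, if_neg h0, pvBest_eq (PySem.Str.upper type_code)]
    unfold pvTarget
    generalize (["B737", "B738", "B739"].any (fun x => PySem.Str.isIn x (PySem.Str.upper type_code))) = b1
    generalize (["B777", "B778", "B779"].any (fun x => PySem.Str.isIn x (PySem.Str.upper type_code))) = b2
    generalize (["A320", "A319", "A321"].any (fun x => PySem.Str.isIn x (PySem.Str.upper type_code))) = b3
    generalize (["A330", "A340", "A350"].any (fun x => PySem.Str.isIn x (PySem.Str.upper type_code))) = b4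
    generalize (PySem.Str.isIn "C172" (PySem.Str.upper type_code)) = b5
    generalize (["GLEX", "GLF", "G650"].any (fun x => PySem.Str.isIn x (PySem.Str.upper type_code))) = b6
    generalize (["H60", "H-60", "UH60"].any (fun x => PySem.Str.isIn x (PySem.Str.upper type_code))) = b7
    generalize (PySem.Str.isIn "C130" (PySem.Str.upper type_code)) = b8
    cases b1 <;> cases b2 <;> cases b3 <;> cases b4 <;> cases b5 <;> cases b6 <;>
      cases b7 <;> cases b8 <;> rfl
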